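-- pv_equiv track=rewrite | github.com/sancovp/starlog-mcp | starlog_mcp/hpi_system.py | _find_latest_session
-- ===== SOURCE A (Python) =====
-- def _find_latest_session(starlog_data: dict) -> dict:
--     """Find the most recent session from starlog data."""
--     latest_session = None
--     latest_timestamp = ""
--
--     for session_id, session_data in starlog_data.items():
--         timestamp = session_data.get("timestamp", "")
--         if timestamp > latest_timestamp:
--             latest_timestamp = timestamp
--             latest_session = session_data
--
--     return latest_session
-- ===== SOURCE B (Python) =====
-- def _find_latest_session(starlog_data: dict) -> dict:
--     """Find the most recent session from starlog data."""
--     sessions = sorted(starlog_data.values(),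
--                       key=lambda s: s.get("timestamp", ""),
--                       reverse=True)
--     if sessions and sessions[0].get("timestamp", "") > "":
--         return sessions[0]
--     return None
-- ===== Notes on version B (the rewrite author's own statement) =====
-- stated objective: alternative
-- what changed: Replaces the single-pass running-max loop (strict > with an empty-string seed) by a stable descending sort on timestamp followed by a guarded head: stability preserves the first-wins tie-break and the > '' guard preserves the all-empty-timestamps None.
import Mathlib
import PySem

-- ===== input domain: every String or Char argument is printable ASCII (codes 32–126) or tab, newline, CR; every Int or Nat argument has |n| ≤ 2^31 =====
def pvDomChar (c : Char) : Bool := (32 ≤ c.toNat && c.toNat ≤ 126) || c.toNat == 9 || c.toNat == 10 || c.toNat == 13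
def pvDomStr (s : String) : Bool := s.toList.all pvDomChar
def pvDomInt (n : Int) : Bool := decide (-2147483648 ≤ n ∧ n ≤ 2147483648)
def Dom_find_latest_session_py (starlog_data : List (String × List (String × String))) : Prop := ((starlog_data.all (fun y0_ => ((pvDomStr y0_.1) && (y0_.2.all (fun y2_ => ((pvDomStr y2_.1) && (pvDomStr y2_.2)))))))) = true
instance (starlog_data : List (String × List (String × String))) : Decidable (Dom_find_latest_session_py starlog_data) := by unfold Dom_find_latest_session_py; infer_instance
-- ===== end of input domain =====

-- B replaces A's single-pass running-max loop by a stable descending sort on timestamp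
-- followed by a guarded head (alternative decomposition, not claimed faster).

-- ===== PORT A =====
def find_latest_session_py (starlog_data : List (String × List (String × String))) : Option (List (String × String)) :=
  (starlog_data.foldl
    (fun (st : Option (List (String × String)) × String) kv =>
      let timestamp := (PySem.Dict.mk kv.2).getD "timestamp" ""
      if st.2 < timestamp then (some kv.2, timestamp) else st)
    (none, "")).1

-- ===== PORT B =====
def pvTs (sd : List (String × String)) : String := (PySem.Dict.mk sd).getD "timestamp" ""

def find_latest_session_py_alt (starlog_data : List (String × List (String × String))) : Option (List (String × String)) :=
  match PySem.List.sorted (starlog_data.map Prod.snd) pvTs true with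
  | [] => none
  | s :: _ => if ("" : String) < pvTs s then some s else none

-- ===== PRECONDITION & SPEC =====
def Spec_find_latest_session_py (starlog_data : List (String × List (String × String))) (out : Option (List (String × String))) : Prop := out = find_latest_session_py_alt starlog_data
instance (starlog_data : List (String × List (String × String))) (out : Option (List (String × String))) : Decidable (Spec_find_latest_session_py starlog_data out) := by unfold Spec_find_latest_session_py; infer_instance

-- ===== CLAIM (what is proved, stated in full; the proofs are below) =====
def Claim_equal_find_latest_session_py : Prop := ∀ (starlog_data : List (String × List (String × String))), Dom_find_latest_session_py starlog_data → Spec_find_latest_session_py starlog_data (find_latest_session_py starlog_data)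

-- ===== LEMMAS AND PROOFS =====

-- every string is "" or strictly above ""
theorem pv_empty_lt (s : String) : s = "" ∨ ("" : String) < s := by
  rcases lt_trichotomy s "" with h | h | h
  · exact absurd h (by simp [String.lt_iff_toList_lt])
  · exact Or.inl h
  · exact Or.inr h

theorem pv_insertBy_cons {α : Type} (before : α → α → Bool) (x y : α) (ys : List α) :
    PySem.List.insertBy before x (y :: ys) =
      if before x y then x :: y :: ys else y :: PySem.List.insertBy before x ys := rfl

-- relation between B's sort accumulator and A's loop state
def pvRel (acc : List (List (String × String))) (st : Option (List (String × String)) × String) : Prop :=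
  (acc = [] ∧ st = (none, "")) ∨
  ∃ m t, acc = m :: t ∧
    ((("" : String) < pvTs m ∧ st = (some m, pvTs m)) ∨ (pvTs m = "" ∧ st = (none, "")))

theorem pvStep (acc : List (List (String × String))) (st : Option (List (String × String)) × String)
    (x : List (String × String)) (h : pvRel acc st) :
    pvRel (PySem.List.insertBy (fun a b => decide (pvTs b < pvTs a)) x acc)
      (if st.2 < pvTs x then (some x, pvTs x) else st) := by
  rcases h with ⟨hacc, hst⟩ | ⟨m, t, hacc, ⟨hm, hst⟩ | ⟨hm, hst⟩⟩
  · subst hacc; subst hst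
    rcases pv_empty_lt (pvTs x) with hx | hx
    · exact Or.inr ⟨x, [], rfl, Or.inr ⟨hx, by simp [hx]⟩⟩
    · exact Or.inr ⟨x, [], rfl, Or.inl ⟨hx, by simp [hx]⟩⟩
  · subst hacc; subst hst
    rw [pv_insertBy_cons]
    by_cases hlt : pvTs m < pvTs x
    · simp only [hlt, decide_true, if_true]
      exact Or.inr ⟨x, m :: t, rfl, Or.inl ⟨lt_trans hm hlt, rfl⟩⟩
    · simp only [hlt, decide_false, if_false]
      exact Or.inr ⟨m, _, rfl, Or.inl ⟨hm, rfl⟩⟩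
  · subst hacc; subst hst
    rw [pv_insertBy_cons, hm]
    by_cases hlt : ("" : String) < pvTs x
    · simp only [hlt, decide_true, if_true]
      exact Or.inr ⟨x, m :: t, rfl, Or.inl ⟨hlt, rfl⟩⟩
    · simp only [hlt, decide_false, if_false]
      exact Or.inr ⟨m, _, rfl, Or.inr ⟨hm, rfl⟩⟩

theorem pvFold (l : List (String × List (String × String)))
    (acc : List (List (String × String))) (st : Option (List (String × String)) × String)
    (h : pvRel acc st) :
    pvRel (l.foldl (fun acc kv => PySem.List.insertBy (fun a b => decide (pvTs b < pvTs a)) kv.2 acc) acc)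
      (l.foldl (fun st kv => if st.2 < pvTs kv.2 then (some kv.2, pvTs kv.2) else st) st) := by
  induction l generalizing acc st with
  | nil => exact h
  | cons kv rest ih => exact ih _ _ (pvStep acc st kv.2 h)

theorem pvA_eq (l : List (String × List (String × String))) :
    find_latest_session_py l =
      (l.foldl (fun st kv => if st.2 < pvTs kv.2 then (some kv.2, pvTs kv.2) else st) (none, "")).1 := rfl

theorem pvB_eq (l : List (String × List (String × String))) :
    find_latest_session_py_alt l =
      match l.foldl (fun acc kv => PySem.List.insertBy (fun a b => decide (pvTs b < pvTs a)) kv.2 acc) [] with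
      | [] => none
      | s :: _ => if ("" : String) < pvTs s then some s else none := by
  unfold find_latest_session_py_alt
  rw [PySem.List.sorted_rev_eq_foldl_insertBy, List.foldl_map]

-- ===== VERDICT (by name: the statement is the Claim_ definition above) =====
theorem find_latest_session_py_spec : Claim_equal_find_latest_session_py := by
  intro l _
  unfold Spec_find_latest_session_py
  rw [pvA_eq, pvB_eq]
  have h := pvFold l [] (none, "") (Or.inl ⟨rfl, rfl⟩)
  rcases h with ⟨hacc, hst⟩ | ⟨m, t, hacc, ⟨hm, hst⟩ | ⟨hm, hst⟩⟩
  · rw [hacc, hst]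
  · rw [hacc, hst]; simp [hm]
  · rw [hacc, hst]; simp [hm]
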